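-- pv_equiv track=rewrite | github.com/chengming1993722/study | worker/bloom_filter/particple.py | minor_segments
-- ===== SOURCE A (Python) =====
-- def minor_segments(s):
--     minor_breaks = '_.'
--     last = -1
--     results = set()
--     count = 0
--     for idx,ch in enumerate(s):
--         if ch in minor_breaks:
--             segment = s[last+1:idx]
--             results.add(segment)
--             segment = s[:idx]
--             results.add(segment)
--             last = idx
--             count+=1
--     segment = s[last+1:]
--     results.add(segment)
--     results.add(s)
--     return results
-- ===== SOURCE B (Python) =====
-- def minor_segments(s):
--     out = []
--     seg = ''
--     pre = ''
--     for ch in s: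
--         if ch in '_.':
--             out.append(seg)
--             pre += seg
--             out.append(pre)
--             pre += ch
--             seg = ''
--         else:
--             seg += ch
--     out.append(seg)
--     out.append(s)
--     return set(out)
-- ===== Notes on version B (the rewrite author's own statement) =====
-- stated objective: simpler
-- what changed: Replaces A's index bookkeeping (last break index, count, slices s[last+1:idx] and s[:idx]) with direct accumulation of the current segment and the running prefix as strings, appending them to a list and returning set(out).
import Mathlib
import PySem

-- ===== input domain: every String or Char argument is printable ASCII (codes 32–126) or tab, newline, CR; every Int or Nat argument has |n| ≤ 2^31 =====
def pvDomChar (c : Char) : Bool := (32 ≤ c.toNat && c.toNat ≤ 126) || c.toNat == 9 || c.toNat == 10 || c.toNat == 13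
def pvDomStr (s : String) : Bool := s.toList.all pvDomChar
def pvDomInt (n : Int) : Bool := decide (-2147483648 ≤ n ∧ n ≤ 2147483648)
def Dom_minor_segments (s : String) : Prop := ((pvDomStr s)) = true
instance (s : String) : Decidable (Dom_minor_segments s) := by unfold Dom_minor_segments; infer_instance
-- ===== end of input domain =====

-- B replaces A's index/slice bookkeeping (last, count, s[last+1:idx], s[:idx]) with direct string
-- accumulation of the current segment and the running prefix (objective: simpler, no index arithmetic).

-- ===== PORT A =====
-- loop body of A: state (last, results, count), item (idx, ch); slices are over the whole string cs
def minorA_step (cs : List Char) (st : Int × PySem.Set String × Int) (p : Int × Char) :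
    Int × PySem.Set String × Int :=
  if PySem.Chars.isIn [p.2] ['_', '.'] then        -- 'ch in minor_breaks' (substring test; ch has length 1)
    (p.1,
     ((st.2.1.add (String.ofList (PySem.Chars.slice cs (some (st.1 + 1)) (some p.1)))).add
        (String.ofList (PySem.Chars.slice cs none (some p.1)))),
     st.2.2 + 1)
  else st

def minor_segments (s : String) : List String :=
  let cs := s.toList
  let st := (PySem.List.enumerate cs 0).foldl (minorA_step cs) (-1, PySem.Set.empty, 0)
  (st.2.1.add (String.ofList (PySem.Chars.slice cs (some (st.1 + 1)) none))).add s

-- ===== PORT B =====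
-- loop body of B: state (out, seg, pre); seg/pre are accumulated character lists (Python strings)
def minorB_step (st : List String × List Char × List Char) (ch : Char) :
    List String × List Char × List Char :=
  if PySem.Chars.isIn [ch] ['_', '.'] then
    (st.1 ++ [String.ofList st.2.1, String.ofList (st.2.2 ++ st.2.1)], [], (st.2.2 ++ st.2.1) ++ [ch])
  else (st.1, st.2.1 ++ [ch], st.2.2)

def minor_segments_alt (s : String) : List String :=
  let st := s.toList.foldl minorB_step ([], [], [])
  PySem.Set.ofList (st.1 ++ [String.ofList st.2.1, s])

-- ===== PRECONDITION & SPEC =====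
def Spec_minor_segments (s : String) (out : List String) : Prop := out = minor_segments_alt s
instance (s : String) (out : List String) : Decidable (Spec_minor_segments s out) := by unfold Spec_minor_segments; infer_instance

-- ===== CLAIM (what is proved, stated in full; the proofs are below) =====
def Claim_equal_minor_segments : Prop := ∀ (s : String), Dom_minor_segments s → Spec_minor_segments s (minor_segments s)

-- ===== LEMMAS AND PROOFS =====

-- Both fold loops, run from matching states, finish in the same set.
-- Invariant: cs = pre ++ seg ++ rest, A's last = pre.length - 1, A's results = Set.ofList out,
-- A's enumerate counter for rest is pre.length + seg.length.
theorem minor_loop_eq (cs : List Char) (sFull : String) :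
    ∀ (rest pre seg : List Char) (out : List String) (count : Int),
    cs = pre ++ (seg ++ rest) →
    (let stA := (PySem.List.enumerate rest ((pre.length + seg.length : Nat) : Int)).foldl
        (minorA_step cs) (((pre.length : Nat) : Int) - 1, PySem.Set.ofList out, count)
     (stA.2.1.add (String.ofList (PySem.Chars.slice cs (some (stA.1 + 1)) none))).add sFull)
    = (let stB := rest.foldl minorB_step (out, seg, pre)
       PySem.Set.ofList (stB.1 ++ [String.ofList stB.2.1, sFull])) := by
  intro rest
  induction rest with
  | nil =>
    intro pre seg out count hcs
    simp only [PySem.List.enumerate_nil, List.foldl_nil]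
    have h1 : ((pre.length : Nat) : Int) - 1 + 1 = ((pre.length : Nat) : Int) := by omega
    rw [h1, PySem.Chars.slice_eq_listSlice, PySem.List.slice_from_natCast]
    have h2 : cs.drop pre.length = seg := by
      subst hcs; simp
    rw [h2]
    have : out ++ [String.ofList seg, sFull] = (out ++ [String.ofList seg]) ++ [sFull] := by simp
    rw [this, PySem.Set.ofList_append_singleton, PySem.Set.ofList_append_singleton]
  | cons ch rest' ih =>
    intro pre seg out count hcs
    rw [PySem.List.enumerate_cons, List.foldl_cons, List.foldl_cons]
    by_cases hb : PySem.Chars.isIn [ch] ['_', '.'] = true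
    · -- break character: both sides emit the segment and the prefix
      have hsliceSeg : PySem.Chars.slice cs (some (((pre.length : Nat) : Int) - 1 + 1))
          (some ((pre.length + seg.length : Nat) : Int)) = seg := by
        have h1 : ((pre.length : Nat) : Int) - 1 + 1 = ((pre.length : Nat) : Int) := by omega
        rw [h1, PySem.Chars.slice_eq_listSlice, PySem.List.slice_natCast]
        subst hcs
        rw [List.drop_left]
        simp [List.take_left']
      have hslicePre : PySem.Chars.slice cs none (some ((pre.length + seg.length : Nat) : Int))
          = pre ++ seg := by
        rw [PySem.Chars.slice_eq_listSlice, PySem.List.slice_to_natCast]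
        subst hcs
        rw [show pre ++ (seg ++ (ch :: rest')) = (pre ++ seg) ++ (ch :: rest') by simp]
        rw [List.take_left']
        simp
      have hA : minorA_step cs (((pre.length : Nat) : Int) - 1, PySem.Set.ofList out, count)
          ((pre.length + seg.length : Nat), ch)
          = (((pre.length + seg.length : Nat) : Int),
             PySem.Set.ofList (out ++ [String.ofList seg, String.ofList (pre ++ seg)]), count + 1) := by
        simp only [minorA_step, hb, if_true, hsliceSeg, hslicePre]
        rw [show out ++ [String.ofList seg, String.ofList (pre ++ seg)]
              = (out ++ [String.ofList seg]) ++ [String.ofList (pre ++ seg)] by simp,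
            PySem.Set.ofList_append_singleton, PySem.Set.ofList_append_singleton]
      have hB : minorB_step (out, seg, pre) ch
          = (out ++ [String.ofList seg, String.ofList (pre ++ seg)], [], (pre ++ seg) ++ [ch]) := by
        simp [minorB_step, hb]
      rw [hA, hB]
      have hcs' : cs = ((pre ++ seg) ++ [ch]) ++ ([] ++ rest') := by
        subst hcs; simp
      have := ih ((pre ++ seg) ++ [ch]) [] (out ++ [String.ofList seg, String.ofList (pre ++ seg)])
        (count + 1) hcs'
      have hlen : ((((pre ++ seg) ++ [ch]).length + ([] : List Char).length : Nat) : Int)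
          = ((pre.length + seg.length : Nat) : Int) + 1 := by simp; ring
      have hlast : ((((pre ++ seg) ++ [ch]).length : Nat) : Int) - 1
          = ((pre.length + seg.length : Nat) : Int) := by simp; ring
      rw [hlen, hlast] at this
      exact this
    · -- ordinary character: A's state is unchanged, B extends seg
      have hbf : PySem.Chars.isIn [ch] ['_', '.'] = false := by
        exact eq_false_of_ne_true hb
      have hA : minorA_step cs (((pre.length : Nat) : Int) - 1, PySem.Set.ofList out, count)
          ((pre.length + seg.length : Nat), ch)
          = (((pre.length : Nat) : Int) - 1, PySem.Set.ofList out, count) := by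
        simp [minorA_step, hbf]
      have hB : minorB_step (out, seg, pre) ch = (out, seg ++ [ch], pre) := by
        simp [minorB_step, hbf]
      rw [hA, hB]
      have hcs' : cs = pre ++ ((seg ++ [ch]) ++ rest') := by
        subst hcs; simp
      have := ih pre (seg ++ [ch]) out count hcs'
      have hlen : ((pre.length + (seg ++ [ch]).length : Nat) : Int)
          = ((pre.length + seg.length : Nat) : Int) + 1 := by simp; ring
      rw [hlen] at this
      exact this

-- ===== VERDICT (by name: the statement is the Claim_ definition above) =====
theorem minor_segments_spec : Claim_equal_minor_segments := by
  intro s _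
  unfold Spec_minor_segments minor_segments minor_segments_alt
  have h := minor_loop_eq s.toList s s.toList [] [] [] 0 (by simp)
  simpa using h
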